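-- pv_equiv track=rewrite | github.com/juanestebancg2806/codeforces | 1307A/1307A.py | solve
-- ===== SOURCE A (Python) =====
-- def solve(a,d):
--     i,N = 0,len(a)
--     while d > 0:
--         i = 2
--         while i < N and a[1] == 0 and d > 0:
--             if a[i] > 0:
--                 a[1] += 1
--                 d -= (i-1)
--                 a[i] -= 1
--             i += 1
--         if d > 0:
--             d -= 1
--             if N > 1 and a[1] > 0:
--                 a[1],a[0] = a[1]-1,a[0]+1
--     return a[0]
-- ===== SOURCE B (Python) =====
-- def solve(a, d):
--     # Greedy closed form: pulling one haybale from pile i to pile 0 costs i moves,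
--     # cheapest piles first -- same result as A's one-bale-at-a-time simulation.
--     total = a[0]
--     rem = d
--     for i in range(1, len(a)):
--         if rem <= 0:
--             break
--         t = min(a[i], rem // i)
--         total += t
--         rem -= t * i
--     return total
-- ===== Notes on version B (the rewrite author's own statement) =====
-- stated objective: faster
-- what changed: A simulates moving one haybale at a time (an outer loop driven by the move budget d with an inner rescan of the piles); B replaces the whole simulation by a single greedy pass that adds min(a[i], rem//i) bales per pile and decrements the remaining budget.
-- outside the precondition, e.g. on solve([], 5): A raises IndexError, B raises IndexError; on solve([0, -1, 5], 10): A returns 0, B returns 4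
import Mathlib
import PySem

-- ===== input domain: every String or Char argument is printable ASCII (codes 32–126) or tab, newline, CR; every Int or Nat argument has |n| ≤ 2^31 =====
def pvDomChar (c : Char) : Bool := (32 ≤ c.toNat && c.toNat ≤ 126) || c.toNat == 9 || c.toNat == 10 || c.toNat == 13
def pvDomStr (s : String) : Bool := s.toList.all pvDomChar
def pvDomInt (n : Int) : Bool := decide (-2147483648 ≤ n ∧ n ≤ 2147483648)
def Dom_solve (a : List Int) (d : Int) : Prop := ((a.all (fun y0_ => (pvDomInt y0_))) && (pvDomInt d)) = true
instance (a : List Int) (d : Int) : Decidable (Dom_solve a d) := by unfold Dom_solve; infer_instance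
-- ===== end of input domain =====

-- B replaces A's bale-by-bale simulation with one greedy pass (min(a[i], rem//i) per pile):
-- O(n) instead of O(d*n).  Equivalence is about the RETURN value only: A mutates its list
-- argument in place, B does not.

-- ===== PORT A =====
-- the inner 'while i < N and a[1] == 0 and d > 0' loop; i is Python's scan index (always ≥ 2,
-- so a Nat; list reads a[k] are in range whenever the guard holds, so List.getD is exact)
def innerA (a : List Int) (d : Int) (i : Nat) : List Int × Int :=
  if h : i < a.length ∧ a.getD 1 0 = 0 ∧ 0 < d then
    if 0 < a.getD i 0 then
      -- a[1] += 1; d -= (i-1); a[i] -= 1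
      let a1 := a.set 1 (a.getD 1 0 + 1)
      innerA (a1.set i (a1.getD i 0 - 1)) (d - ((i : Int) - 1)) (i + 1)
    else innerA a d (i + 1)
  else (a, d)
termination_by a.length - i
decreasing_by
  · simp only [List.length_set]; omega
  · omega

-- the outer 'while d > 0' loop; each iteration strictly decreases d, so fuel = d.toNat is
-- never exhausted before the guard d > 0 fails (the fuel-0 return equals the guard's return)
def outerA : Nat → List Int → Int → List Int × Int
  | 0, a, d => (a, d)
  | fuel + 1, a, d =>
    if 0 < d then
      let p := innerA a d 2
      if 0 < p.2 then
        if 1 < p.1.length ∧ 0 < p.1.getD 1 0 then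
          -- a[1], a[0] = a[1]-1, a[0]+1
          outerA fuel ((p.1.set 1 (p.1.getD 1 0 - 1)).set 0 (p.1.getD 0 0 + 1)) (p.2 - 1)
        else outerA fuel p.1 (p.2 - 1)
      else p
    else (a, d)

def solve (a : List Int) (d : Int) : Int :=
  ((outerA d.toNat a d).1).getD 0 0   -- final 'return a[0]'; a ≠ [] is required by Pre_solve

-- ===== PORT B =====
-- the 'for i in range(1, len(a))' greedy pass with running weight i and remaining budget rem
def greedyB : List Int → Int → Int → Int
  | [], _, _ => 0
  | x :: xs, i, rem =>
    if rem ≤ 0 then 0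
    else
      let t := min x (PySem.Int.floordiv rem i)
      t + greedyB xs (i + 1) (rem - t * i)

def solve_alt (a : List Int) (d : Int) : Int :=
  match a with
  | [] => 0            -- unreachable under Pre_solve (Source B raises IndexError on [])
  | a0 :: rest => a0 + greedyB rest 1 d

-- ===== PRECONDITION & SPEC =====
-- Pre_ excludes the empty list, on which A raises IndexError, and lists with a negative
-- haybale count in a pile other than pile 0 (nonsensical input on which A's behaviour —
-- a negative a[1] freezes every move — is an accident of its implementation).
def Pre_solve (a : List Int) (d : Int) : Prop := a ≠ [] ∧ ∀ x ∈ a.drop 1, 0 ≤ x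
instance (a : List Int) (d : Int) : Decidable (Pre_solve a d) := by unfold Pre_solve; infer_instance
def pvWitness_solve : List Int × Int := ([3, 0, 2, 1], 5)

def Spec_solve (a : List Int) (d : Int) (out : Int) : Prop := out = solve_alt a d
instance (a : List Int) (d : Int) (out : Int) : Decidable (Spec_solve a d out) := by unfold Spec_solve; infer_instance

-- ===== CLAIM (what is proved, stated in full; the proofs are below) =====
def Claim_equal_solve : Prop := ∀ (a : List Int) (d : Int), Dom_solve a d → Pre_solve a d → Spec_solve a d (solve a d)

-- ===== LEMMAS AND PROOFS =====

-- facts about floor division by a positive divisor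
lemma fd_nonneg {a b : Int} (hb : 0 < b) (ha : 0 ≤ a) : 0 ≤ PySem.Int.floordiv a b := by
  rw [PySem.Int.le_floordiv_iff_mul_le hb]; linarith

lemma fd_zero {a b : Int} (hb : 0 < b) (ha : 0 ≤ a) (hab : a < b) : PySem.Int.floordiv a b = 0 := by
  rw [PySem.Int.floordiv_eq_iff_of_pos hb]; constructor <;> linarith

lemma fd_one {b : Int} (hb : 0 < b) : PySem.Int.floordiv b b = 1 := by
  rw [PySem.Int.floordiv_eq_iff_of_pos hb]; constructor <;> linarith

lemma fd_sub {a b : Int} (hb : 0 < b) :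
    PySem.Int.floordiv (a - b) b = PySem.Int.floordiv a b - 1 := by
  have h := (PySem.Int.floordiv_eq_iff_of_pos (a := a) hb).mp rfl
  rw [PySem.Int.floordiv_eq_iff_of_pos hb]
  constructor <;> nlinarith [h.1, h.2]

-- greedyB vanishes on an exhausted budget
lemma g_nonpos (xs : List Int) (i rem : Int) (h : rem ≤ 0) : greedyB xs i rem = 0 := by
  cases xs <;> simp [greedyB, h]

-- greedyB vanishes on an all-zero list
lemma g_zeros (xs : List Int) : ∀ (i rem : Int), (∀ z ∈ xs, z = 0) → 0 < i →
    greedyB xs i rem = 0 := by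
  induction xs with
  | nil => intro i rem _ _; simp [greedyB]
  | cons x xs ih =>
    intro i rem hz hi
    by_cases hr : rem ≤ 0
    · simp [greedyB, hr]
    · have hx : x = 0 := hz x (by simp)
      have h0 : min x (PySem.Int.floordiv rem i) = 0 := by
        rw [hx]; exact min_eq_left (fd_nonneg hi (by omega))
      simp only [greedyB, if_neg hr, h0, zero_mul, sub_zero, zero_add]
      exact ih (i + 1) rem (fun z hzz => hz z (by simp [hzz])) (by omega)

-- greedyB vanishes when the budget is below the current weight (nonneg entries)
lemma g_small (xs : List Int) : ∀ (i rem : Int), (∀ z ∈ xs, 0 ≤ z) → 0 ≤ rem → rem < i →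
    greedyB xs i rem = 0 := by
  induction xs with
  | nil => intro i rem _ _ _; simp [greedyB]
  | cons x xs ih =>
    intro i rem hz h0 hri
    by_cases hr : rem ≤ 0
    · simp [greedyB, hr]
    · have hi : 0 < i := by omega
      have ht : min x (PySem.Int.floordiv rem i) = 0 := by
        rw [fd_zero hi h0 hri]; exact min_eq_right (hz x (by simp))
      simp only [greedyB, if_neg hr, ht, zero_mul, sub_zero, zero_add]
      exact ih (i + 1) rem (fun z hzz => hz z (by simp [hzz])) h0 (by omega)

-- a zero prefix only advances the weight
lemma g_prefix : ∀ (m : Nat) (ys : List Int) (i rem : Int), 0 < i →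
    greedyB (List.replicate m 0 ++ ys) i rem = greedyB ys (i + m) rem := by
  intro m
  induction m with
  | zero => intro ys i rem _; simp
  | succ m ih =>
    intro ys i rem hi
    by_cases hr : rem ≤ 0
    · rw [g_nonpos _ _ _ hr, g_nonpos _ _ _ hr]
    · have h0 : min (0 : Int) (PySem.Int.floordiv rem i) = 0 :=
        min_eq_left (fd_nonneg hi (by omega))
      simp only [List.replicate_succ, List.cons_append, greedyB, if_neg hr, h0, zero_mul,
        sub_zero, zero_add]
      rw [ih ys (i + 1) rem (by omega)]
      congr 1
      push_cast
      ring

-- taking one bale of weight w: budget drops by w, the pile by 1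
lemma g_step_base (x : Int) (ys : List Int) (w rem : Int) (hx : 1 ≤ x) (hw : 0 < w)
    (hrem : w ≤ rem) : greedyB (x :: ys) w rem = 1 + greedyB ((x - 1) :: ys) w (rem - w) := by
  have hr : ¬ rem ≤ 0 := by omega
  by_cases hrw : rem - w ≤ 0
  · have heq : rem = w := by omega
    have ht : min x (PySem.Int.floordiv rem w) = 1 := by
      rw [heq, fd_one hw]; exact min_eq_right hx
    simp only [greedyB, if_neg hr, ht, one_mul, if_pos hrw]
    rw [g_nonpos ys (w + 1) (rem - w) hrw]
  · have ht' : min (x - 1) (PySem.Int.floordiv (rem - w) w)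
        = min x (PySem.Int.floordiv rem w) - 1 := by
      rw [fd_sub hw, ← min_sub_sub_right]
    simp only [greedyB, if_neg hr, if_neg hrw, ht']
    have harg : rem - w - (min x (PySem.Int.floordiv rem w) - 1) * w
        = rem - min x (PySem.Int.floordiv rem w) * w := by ring
    rw [harg]
    ring

-- the same through a zero prefix, at start weight 1
lemma g_step (m : Nat) (x : Int) (ys : List Int) (rem : Int) (hx : 1 ≤ x)
    (hrem : 1 + (m : Int) ≤ rem) :
    greedyB (List.replicate m 0 ++ x :: ys) 1 rem
      = 1 + greedyB (List.replicate m 0 ++ (x - 1) :: ys) 1 (rem - (1 + (m : Int))) := by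
  rw [g_prefix m (x :: ys) 1 rem (by omega), g_prefix m ((x - 1) :: ys) 1 _ (by omega)]
  exact g_step_base x ys (1 + (m : Int)) rem hx (by positivity) hrem

-- getD of an all-nonpositive list is nonpositive
lemma getD_nonpos : ∀ (l : List Int) (k : Nat), (∀ z ∈ l, z ≤ 0) → l.getD k 0 ≤ 0 := by
  intro l
  induction l with
  | nil => intro k _; simp
  | cons x xs ih =>
    intro k h
    cases k with
    | zero => simpa using h x (by simp)
    | succ k => simpa using ih k (fun z hz => h z (by simp [hz]))

lemma rep_getD : ∀ (p q : Nat) (ys : List Int), q < p →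
    (List.replicate p (0 : Int) ++ ys).getD q 0 = 0 := by
  intro p
  induction p with
  | zero => omega
  | succ p ih =>
    intro q ys hq
    cases q with
    | zero => simp [List.replicate_succ]
    | succ q => simpa [List.replicate_succ] using ih q ys (by omega)

lemma getD_mid : ∀ (l : List Int) (x : Int) (ys : List Int),
    (l ++ x :: ys).getD l.length 0 = x := by
  intro l
  induction l with
  | nil => simp
  | cons z l ih => intro x ys; simpa using ih x ys

-- a list of nonnegatives is all zero or has a first positive entry after p zeros
lemma decomp_first_pos : ∀ (l : List Int), (∀ z ∈ l, 0 ≤ z) →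
    (∀ z ∈ l, z = 0) ∨
      ∃ p x ys, l = List.replicate p 0 ++ x :: ys ∧ 0 < x ∧ ∀ z ∈ ys, 0 ≤ z := by
  intro l
  induction l with
  | nil => intro _; left; simp
  | cons z l ih =>
    intro h
    by_cases hz : z = 0
    · rcases ih (fun w hw => h w (by simp [hw])) with hall | ⟨p, x, ys, hl, hx, hys⟩
      · left; intro w hw
        rcases List.mem_cons.mp hw with h1 | h2
        · omega
        · exact hall w h2
      · right; exact ⟨p + 1, x, ys, by simp [List.replicate_succ, hl, hz], hx, hys⟩
    · right
      refine ⟨0, z, l, by simp, ?_, fun w hw => h w (by simp [hw])⟩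
      have := h z (by simp)
      omega

-- the inner loop does nothing when a[1] ≠ 0
lemma inner_stop (a : List Int) (d : Int) (i : Nat) (h : a.getD 1 0 ≠ 0) :
    innerA a d i = (a, d) := by
  rw [innerA, dif_neg]
  tauto

-- the inner loop does nothing when every pile from i on is empty
lemma inner_none (a : List Int) (d : Int) :
    ∀ (n i : Nat), a.length - i ≤ n → (∀ k, i ≤ k → k < a.length → a.getD k 0 ≤ 0) →
      innerA a d i = (a, d) := by
  intro n
  induction n with
  | zero =>
    intro i hn _
    rw [innerA, dif_neg]
    intro ⟨h1, _, _⟩; omega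
  | succ n ih =>
    intro i hn h
    rw [innerA]
    by_cases hc : i < a.length ∧ a.getD 1 0 = 0 ∧ 0 < d
    · rw [dif_pos hc, if_neg (by have := h i le_rfl hc.1; omega)]
      exact ih (i + 1) (by omega) (fun k hk1 hk2 => h k (by omega) hk2)
    · rw [dif_neg hc]

-- the inner scan at the loaded pile j itself: move one bale to pile 1, pay j-1, stop
lemma getD_set11 (a : List Int) (i : Nat) (v w : Int) (h1 : 1 < a.length) (hne : i ≠ 1) :
    ((a.set 1 v).set i w).getD 1 0 = v := by
  rw [List.getD_eq_getElem?_getD, List.getElem?_set_ne hne, List.getElem?_set_self']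
  simp [List.getElem?_eq_getElem h1]

lemma inner_at (a : List Int) (d : Int) (j : Nat) (hj : j < a.length)
    (h1 : a.getD 1 0 = 0) (hd : 0 < d) (hpos : 0 < a.getD j 0) (h2 : 2 ≤ j) :
    innerA a d j =
      ((a.set 1 (a.getD 1 0 + 1)).set j
          ((a.set 1 (a.getD 1 0 + 1)).getD j 0 - 1), d - ((j : Int) - 1)) := by
  rw [innerA, dif_pos ⟨hj, h1, hd⟩, if_pos hpos]
  exact inner_stop _ _ _ (by rw [getD_set11 a j _ _ (by omega) (by omega)]; omega)

-- the inner loop finds the first loaded pile j, moves one bale to pile 1 and pays j-1 moves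
lemma inner_found (a : List Int) (d : Int) (j : Nat) (hj : j < a.length)
    (h1 : a.getD 1 0 = 0) (hd : 0 < d) (hpos : 0 < a.getD j 0) :
    ∀ (n i : Nat), j - i ≤ n → 2 ≤ i → i ≤ j → (∀ k, i ≤ k → k < j → a.getD k 0 ≤ 0) →
      innerA a d i =
        ((a.set 1 (a.getD 1 0 + 1)).set j
            ((a.set 1 (a.getD 1 0 + 1)).getD j 0 - 1), d - ((j : Int) - 1)) := by
  intro n
  induction n with
  | zero =>
    intro i hn h2 hij _
    have hij' : i = j := by omega
    subst hij'
    exact inner_at a d i hj h1 hd hpos h2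
  | succ n ih =>
    intro i hn h2 hij h
    by_cases hij' : i = j
    · subst hij'
      exact inner_at a d i hj h1 hd hpos h2
    · rw [innerA, dif_pos ⟨by omega, h1, hd⟩, if_neg (by have := h i le_rfl (by omega); omega)]
      exact ih (i + 1) (by omega) (by omega) (by omega) (fun k hk1 hk2 => h k (by omega) hk2)

-- the main loop invariant: outerA computes a[0] + greedyB of the tail
lemma outer_main : ∀ (fuel : Nat) (d : Int) (a0 : Int) (tail : List Int),
    (∀ x ∈ tail, 0 ≤ x) → d.toNat ≤ fuel →
    ((outerA fuel (a0 :: tail) d).1).getD 0 0 = a0 + greedyB tail 1 d := by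
  intro fuel
  induction fuel with
  | zero =>
    intro d a0 tail _ hfu
    have hd : d ≤ 0 := by omega
    simp [outerA, g_nonpos tail 1 d hd]
  | succ fuel ih =>
    intro d a0 tail hnn hfu
    by_cases hd : 0 < d
    · cases tail with
      | nil =>
        have hin : innerA [a0] d 2 = ([a0], d) :=
          inner_none _ _ 1 2 (by simp) (by intro k hk1 hk2; simp at hk2; omega)
        simp only [outerA, if_pos hd, hin]
        norm_num
        simpa [greedyB, List.getD_eq_getElem?_getD] using ih (d - 1) a0 [] (by simp) (by omega)
      | cons a1 rest =>
        have ha1 : 0 ≤ a1 := hnn a1 (by simp)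
        have hrest : ∀ x ∈ rest, 0 ≤ x := fun x hx => hnn x (by simp [hx])
        by_cases h1 : a1 = 0
        · subst h1
          rcases decomp_first_pos rest hrest with hall | ⟨p, x, ys, hrl, hx, hys⟩
          · -- every pile beyond 1 is empty: the inner loop does nothing, d just counts down
            have hin : innerA (a0 :: 0 :: rest) d 2 = (a0 :: 0 :: rest, d) := by
              apply inner_none _ _ (a0 :: 0 :: rest).length 2 (by omega)
              intro k hk2 hklen
              match k, hk2 with
              | (k + 2), _ =>
                have hk : (a0 :: (0:Int) :: rest).getD (k + 2) 0 = rest.getD k 0 := by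
                  simp [List.getD]
                rw [hk]
                exact getD_nonpos rest k (fun z hz => by rw [hall z hz])
            simp only [outerA, if_pos hd, hin]
            rw [if_neg (by simp [List.getD])]
            rw [ih (d - 1) a0 (0 :: rest) hnn (by omega)]
            have hallz : ∀ z ∈ (0:Int) :: rest, z = 0 := by
              intro z hz
              rcases List.mem_cons.mp hz with h | h
              · exact h
              · exact hall z h
            rw [g_zeros (0 :: rest) 1 (d - 1) hallz (by omega)]
            rw [g_zeros (0 :: rest) 1 d hallz (by omega)]
          · -- first loaded pile at index p+2: one bale is pulled to pile 1 and then to pile 0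
            have hjlen : p + 2 < (a0 :: 0 :: rest).length := by simp [hrl]
            have hget1 : (a0 :: (0:Int) :: rest).getD 1 0 = 0 := by simp [List.getD]
            have hgetp : rest.getD p 0 = x := by
              rw [hrl]; simpa using getD_mid (List.replicate p 0) x ys
            have hgetj : (a0 :: (0:Int) :: rest).getD (p + 2) 0 = x := by
              have hk : (a0 :: (0:Int) :: rest).getD (p + 2) 0 = rest.getD p 0 := by
                simp [List.getD]
              rw [hk, hgetp]
            have hzero : ∀ k, 2 ≤ k → k < p + 2 → (a0 :: (0:Int) :: rest).getD k 0 ≤ 0 := by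
              intro k hk2 hkp
              match k, hk2 with
              | (k + 2), _ =>
                have hk : (a0 :: (0:Int) :: rest).getD (k + 2) 0 = rest.getD k 0 := by
                  simp [List.getD]
                rw [hk, hrl, rep_getD p k _ (by omega)]
            have hin := inner_found (a0 :: 0 :: rest) d (p + 2) hjlen hget1 hd
              (by rw [hgetj]; omega) (p + 2) 2 (by omega) (by omega) (by omega) hzero
            -- the list produced by the inner loop
            have hA' : ((a0 :: (0:Int) :: rest).set 1 ((a0 :: (0:Int) :: rest).getD 1 0 + 1)).set (p + 2)
                  ((((a0 :: (0:Int) :: rest).set 1 ((a0 :: (0:Int) :: rest).getD 1 0 + 1))).getD (p + 2) 0 - 1)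
                = a0 :: 1 :: (List.replicate p 0 ++ (x - 1) :: ys) := by
              rw [hget1]
              show a0 :: (0 + 1 : Int) :: rest.set p ((a0 :: (0+1:Int) :: rest).getD (p+2) 0 - 1)
                  = a0 :: 1 :: (List.replicate p 0 ++ (x - 1) :: ys)
              have hg : (a0 :: (0+1:Int) :: rest).getD (p+2) 0 = rest.getD p 0 := by
                simp [List.getD]
              rw [hg, hgetp, hrl]
              norm_num
            rw [show ((p + 2 : Nat) : Int) - 1 = (p : Int) + 1 by push_cast; ring] at hin
            simp only [outerA, if_pos hd, hin, hA']
            by_cases hd' : 0 < d - ((p : Int) + 1)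
            · -- enough budget: the bale reaches pile 0, recurse with d - (p+2)
              rw [if_pos hd', if_pos (by refine ⟨by simp, ?_⟩; simp [List.getD])]
              have hmove : ((a0 :: (1:Int) :: (List.replicate p 0 ++ (x - 1) :: ys)).set 1
                    ((a0 :: (1:Int) :: (List.replicate p 0 ++ (x - 1) :: ys)).getD 1 0 - 1)).set 0
                    ((a0 :: (1:Int) :: (List.replicate p 0 ++ (x - 1) :: ys)).getD 0 0 + 1)
                  = (a0 + 1) :: 0 :: (List.replicate p 0 ++ (x - 1) :: ys) := by
                simp [List.getD, List.set]
              rw [hmove]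
              rw [ih (d - ((p:Int)+1) - 1) (a0 + 1) (0 :: (List.replicate p 0 ++ (x - 1) :: ys))
                (by intro z hz; rcases List.mem_cons.mp hz with h | h
                    · omega
                    · rcases List.mem_append.mp h with h2 | h2
                      · have := List.eq_of_mem_replicate h2; omega
                      · rcases List.mem_cons.mp h2 with h3 | h3
                        · omega
                        · exact hys z h3)
                (by omega)]
              have hstep := g_step (p + 1) x ys d (by omega)
                (by push_cast; omega)
              have hrw1 : (0:Int) :: rest = List.replicate (p+1) 0 ++ x :: ys := by
                rw [hrl]; simp [List.replicate_succ]
              have hrw2 : (0:Int) :: (List.replicate p 0 ++ (x - 1) :: ys)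
                  = List.replicate (p+1) 0 ++ (x - 1) :: ys := by
                simp [List.replicate_succ]
              have harg : d - (1 + ((p + 1 : Nat) : Int)) = d - ((p:Int)+1) - 1 := by
                push_cast; ring
              rw [hrw1, hrw2, hstep, harg]
              ring
            · -- budget exhausted pulling the bale: it never reaches pile 0
              rw [if_neg hd']
              show (a0 :: (1:Int) :: (List.replicate p 0 ++ (x - 1) :: ys)).getD 0 0
                  = a0 + greedyB (0 :: rest) 1 d
              have hrw1 : (0:Int) :: rest = List.replicate (p+1) 0 ++ x :: ys := by
                rw [hrl]; simp [List.replicate_succ]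
              rw [hrw1, g_prefix (p+1) (x :: ys) 1 d (by omega)]
              rw [g_small (x :: ys) (1 + ((p+1:Nat):Int)) d
                (by intro z hz; rcases List.mem_cons.mp hz with h | h
                    · omega
                    · exact hys z h)
                (by omega) (by push_cast; omega)]
              simp [List.getD]
        · -- a[1] > 0: a bale moves straight from pile 1 to pile 0 at cost 1
          have ha1' : 0 < a1 := by omega
          have hin : innerA (a0 :: a1 :: rest) d 2 = (a0 :: a1 :: rest, d) :=
            inner_stop _ _ _ (by simp [List.getD]; omega)
          simp only [outerA, if_pos hd, hin]
          rw [if_pos (by refine ⟨by simp, ?_⟩; simp [List.getD]; omega)]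
          have hmove : ((a0 :: a1 :: rest).set 1 ((a0 :: a1 :: rest).getD 1 0 - 1)).set 0
                ((a0 :: a1 :: rest).getD 0 0 + 1) = (a0 + 1) :: (a1 - 1) :: rest := by
            simp [List.getD, List.set]
          rw [hmove]
          rw [ih (d - 1) (a0 + 1) ((a1 - 1) :: rest)
            (by intro z hz; rcases List.mem_cons.mp hz with h | h
                · omega
                · exact hrest z h)
            (by omega)]
          have hstep := g_step 0 a1 rest d (by omega) (by push_cast; omega)
          simp only [List.replicate_zero, List.nil_append, Nat.cast_zero] at hstep
          rw [show d - (1 + (0:Int)) = d - 1 by ring] at hstep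
          rw [hstep]
          ring
    · -- d ≤ 0: the outer guard fails at once
      simp only [outerA, if_neg hd]
      rw [g_nonpos tail 1 d (by omega)]
      simp

-- ===== VERDICT (by name: the statement is the Claim_ definition above) =====
theorem solve_spec : Claim_equal_solve := by
  intro a d _ hpre
  obtain ⟨hne, hnn⟩ := hpre
  match a with
  | [] => exact absurd rfl hne
  | a0 :: tail =>
    unfold Spec_solve solve solve_alt
    exact outer_main d.toNat d a0 tail (by simpa using hnn) le_rfl
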